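-- pv_equiv track=rewrite | github.com/daniel-reich/turbo-robot | ziaNsc7J4ySFY6rF6_9.py | will_fit
-- ===== SOURCE A (Python) =====
-- def will_fit(holds, cargo):
--     x=0
--     for i in holds:
--         if i=='M':
--             x+=100
--         elif i=='S':
--             x+=50
--         elif i=='L':
--             x+=200
--     if sum(cargo)<x:
--         return True
--     else:
--         return False
-- ===== SOURCE B (Python) =====
-- HOLD_CAPACITY = {'M': 100, 'S': 50, 'L': 200}
--
-- def will_fit(holds, cargo):
--     # Pre-sum the load, then consume the holds as a stack (back to front),
--     # subtracting each hold's table-looked-up capacity from the remaining load;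
--     # the cargo fits iff the remaining load goes negative.
--     remaining = sum(cargo)
--     stack = list(holds)
--     while stack:
--         remaining -= HOLD_CAPACITY.get(stack.pop(), 0)
--     return remaining < 0
-- ===== Notes on version B (the rewrite author's own statement) =====
-- stated objective: alternative
-- what changed: Replaces A's forward if/elif capacity-accumulating loop and final comparison by a stack-consuming backward pass that looks each hold up in a capacity table and subtracts it from the pre-summed load, testing whether the remaining load went negative.
import Mathlib
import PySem

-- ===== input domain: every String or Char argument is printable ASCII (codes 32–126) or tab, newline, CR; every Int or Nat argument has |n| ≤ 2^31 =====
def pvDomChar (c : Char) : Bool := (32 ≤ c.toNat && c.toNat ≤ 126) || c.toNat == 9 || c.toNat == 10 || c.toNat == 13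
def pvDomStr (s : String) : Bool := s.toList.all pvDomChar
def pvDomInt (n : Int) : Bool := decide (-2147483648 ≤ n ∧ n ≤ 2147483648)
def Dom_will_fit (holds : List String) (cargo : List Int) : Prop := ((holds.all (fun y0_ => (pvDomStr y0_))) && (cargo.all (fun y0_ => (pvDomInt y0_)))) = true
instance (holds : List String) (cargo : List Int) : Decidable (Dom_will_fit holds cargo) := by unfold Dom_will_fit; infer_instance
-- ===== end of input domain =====

-- B consumes the holds as a stack, back to front, subtracting table-looked-up capacities from the
-- pre-summed load, instead of A's forward if/elif capacity-accumulating loop; objective: alternative.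

-- ===== PORT A =====
def will_fit (holds : List String) (cargo : List Int) : Bool :=
  let x : Int := holds.foldl (fun x i =>
    if i == "M" then x + 100
    else if i == "S" then x + 50
    else if i == "L" then x + 200
    else x) 0
  if cargo.sum < x then true else false

-- ===== PORT B =====
def HOLD_CAPACITY : PySem.Dict String Int :=
  PySem.Dict.ofList [("M", 100), ("S", 50), ("L", 200)]

-- the while loop pops from the END of the stack; consuming the reversed list head-first is the same pops
def will_fit_go (stack : List String) (remaining : Int) : Bool :=
  match stack with
  | [] => decide (remaining < 0)
  | h :: t => will_fit_go t (remaining - HOLD_CAPACITY.getD h 0)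

def will_fit_alt (holds : List String) (cargo : List Int) : Bool :=
  will_fit_go holds.reverse cargo.sum

-- ===== PRECONDITION & SPEC =====
def Spec_will_fit (holds : List String) (cargo : List Int) (out : Bool) : Prop := out = will_fit_alt holds cargo
instance (holds : List String) (cargo : List Int) (out : Bool) : Decidable (Spec_will_fit holds cargo out) := by unfold Spec_will_fit; infer_instance

-- ===== CLAIM (what is proved, stated in full; the proofs are below) =====
def Claim_equal_will_fit : Prop := ∀ (holds : List String) (cargo : List Int), Dom_will_fit holds cargo → Spec_will_fit holds cargo (will_fit holds cargo)

-- ===== LEMMAS AND PROOFS =====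

-- per-hold capacity, the common currency of both ports
def capChar (i : String) : Int :=
  if i == "M" then 100 else if i == "S" then 50 else if i == "L" then 200 else 0

-- A's loop accumulates the sum of per-hold capacities.
theorem will_fit_foldA_eq_sum (l : List String) (x : Int) :
    l.foldl (fun x i =>
      if i == "M" then x + 100
      else if i == "S" then x + 50
      else if i == "L" then x + 200
      else x) x
    = x + (l.map capChar).sum := by
  induction l generalizing x with
  | nil => simp
  | cons h t ih =>
    simp only [List.foldl_cons, ih, List.map_cons, List.sum_cons, capChar]
    split_ifs <;> ring

-- B's table lookup is that same per-hold capacity.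
theorem will_fit_step_eq (h : String) : HOLD_CAPACITY.getD h 0 = capChar h := by
  have hcap : HOLD_CAPACITY = PySem.Dict.mk [("M", 100), ("S", 50), ("L", 200)] := by decide
  rw [hcap]
  by_cases hM : h = "M"
  · subst hM; decide
  by_cases hS : h = "S"
  · subst hS; decide
  by_cases hL : h = "L"
  · subst hL; decide
  simp [capChar, PySem.Dict.getD, PySem.Dict.get?, beq_iff_eq, Ne.symm hM, Ne.symm hS, Ne.symm hL, hM, hS, hL]

-- B's subtracting recursion tests the load against the total capacity of the stack.
theorem will_fit_go_eq (hs : List String) (r : Int) :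
    will_fit_go hs r = decide (r < (hs.map capChar).sum) := by
  induction hs generalizing r with
  | nil => simp [will_fit_go]
  | cons h t ih =>
    simp only [will_fit_go, ih, will_fit_step_eq, List.map_cons, List.sum_cons]
    simp only [decide_eq_decide]
    omega

-- ===== VERDICT (by name: the statement is the Claim_ definition above) =====
theorem will_fit_spec : Claim_equal_will_fit := by
  intro holds cargo _
  unfold Spec_will_fit will_fit will_fit_alt
  rw [will_fit_go_eq, List.map_reverse, List.sum_reverse, will_fit_foldA_eq_sum, zero_add]
  by_cases h : cargo.sum < (List.map capChar holds).sum
  · simp [h]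
  · simp [h]
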